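/- GENERATED by mk_final_copies.py from the proof of the farm's unit `start_decoder.C9b` (farm:start_decoder.C9b.1: Proof.lean) as the
   re-elaboration sweep compiled it — do not edit. -/
import Asan.CheckWalk
import Vorbis.Spec.Units.start_decoder_C9b
import Vorbis.Spec.StartDecoderCarry

open X86 X86.User Asan Vorbis Vorbis.Spec Vorbis.Spec.StartDecoder

set_option maxRecDepth 100000
set_option maxHeartbeats 4000000

namespace Vorbis.Spec.start_decoder_C9b

/-- Segment C9b: `mov esi, 4 ; mov rdi, [rsp+18H] ; call get_bits` and the callee, from `AtC9a` to the return address 0x11473b.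
The carry: `MInv.push`, then `MInv.step` over the reader's footprint (352 bytes of stack, the five windows of `*f`); the struct
`cb(i)` and every table of book `i` are untouched (`blk_kept0`, `young_kept0`), so K1 – K5 by `K15.frame`. -/
theorem c9b_walk : Vorbis.Spec.start_decoder_C9b.Statement := by
  intro Lay hLay μ hμ u₀ hcode h_bits
  intro g i v hat
  obtain ⟨A, A2, A3, Ai, h⟩ := hat
  have hfr := h.frame
  have hhand := h.cur.hand
  have he := hfr.entry
  v_entry he
  simp only [depth] at he_room he_stack
  have w_rip := hfr.rip
  have w_rsp := hfr.rsp
  have c_r14 := h.cur.r14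
  have w_eq : Mem.EqOn Vorbis.L.textLo Vorbis.L.textHi u₀.mem v.mem := hfr.code
  have hdf : v.flags .df = false := (show abiInv _ from hfr.inv).1
  have hmx : v.mxcsr &&& 0x1F80 = 0x1F80 := (show abiInv _ from hfr.inv).2
  have hsse := Vorbis.sseOK_of_abiInv hfr.inv
  obtain ⟨hR1, hR2⟩ := hfr.r_eq
  have eR : g.R = (g.e.reg .rsp).toNat - 1480 := rfl
  have eRA : g.RA = (g.e.reg .rsp).toNat := rfl
  have c_rsp : v.reg .rsp = g.e.reg .rsp - 1480 := by
    rw [w_rsp, eR, ← Vorbis.addr_sub_lit _ 1480 (by show (1480 : Nat) ≤ _; omega), Vorbis.addr_toNat]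
  clear w_rsp
  have k_rsp := c_rsp
  have r_f : v.mem.readLE (g.e.reg .rsp - 1456) 8 = g.f := by
    have e : g.e.reg .rsp - 1456 = addr (g.R + 0x18) := by
      have e1 : g.R + 0x18 = (g.e.reg .rsp).toNat - 1456 := by
        show (g.e.reg .rsp).toNat - 1480 + 0x18 = _
        omega
      rw [e1, ← Vorbis.addr_sub_lit _ 1456 (by show (1456 : Nat) ≤ _; omega), Vorbis.addr_toNat]
    rw [e]
    exact h.cur.slot_f
  -- the invariant of the segment, the positions
  have hpos : Pos g A := Pos.of hfr h.cur
  have hm0 : MInv g i A2 A3 Ai A v.mem := MInv.of hfr h.cur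
  have hcw := hm0.c_where
  obtain ⟨c, hc⟩ : ∃ c, g.cb v.mem i = c := ⟨_, rfl⟩
  rw [hc] at c_r14 hcw
  have hbits := h_bits A.2 g.frames' (g.Blk A) g.len
  have hfT : (addr g.f).toNat = g.f := Vorbis.toNat_addr _ (by
    have := hpos.f_hi
    omega)
  -- `*f` and the input as live ranges for the frames inside the function
  have hsub : ∀ o, o ∈ stackObjs g.frames ++ A.2 → o ∈ stackObjs g.frames' ++ A.2 := by
    intro o ho
    unfold Ghost.frames'
    rw [stackObjs_cons]
    rcases List.mem_append.mp ho with hs | ho'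
    · exact List.mem_append_left _ (List.mem_append_right _ hs)
    · exact List.mem_append_right _ ho'
  u_walk hcode [hμ.vendor] until [Vorbis.L.start_decoder.cut119] span [Vorbis.L.textLo, Vorbis.L.textHi] side (v_side)
  case call_inv => v_inv
  case pre_114736 =>
    have hp1 := hm0.push hpos (g.e.reg .rsp - 1488) 1132347 (by u_omega)
    rw [← w_mem] at hp1
    obtain ⟨hm1, hcb1⟩ := hp1
    have hrdi : (s_114736.reg .rdi).toNat = g.f := by
      rw [w_rdi]
      exact hfT
    have hsh : ShadowPre A.2 g.frames' s_114736 := by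
      refine ⟨?_, hfr.offText⟩
      have e : (s_114736.reg .rsp).toNat + 8 = g.R := by
        rw [w_rsp]
        u_omega
      rw [e]
      exact hm1.shadow
    refine ⟨⟨hsh, ?_, ?_⟩, ?_⟩
    · rw [hrdi]
      exact ⟨hm1.sd.env.live, hhand.obj.mono hsub, fun hl => (hhand.inp hl).mono hsub⟩
    · rw [hrdi]
      exact hm1.sd.bits
    · rw [Vorbis.Spec.bitsArg_def, w_rsi]
      decide
  case cont =>
    simp only [X86.User.Spec.footprint, vspec, w_rsp_114736, w_rdi_114736] at w_same
    have hfT' : (UInt64.ofNat g.f).toNat = g.f := hfT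
    rw [hfT'] at w_same
    have hspT : (g.e.reg .rsp - 1488).toNat = g.R - 8 := by u_omega
    rw [hspT] at w_same
    have hpost : GetBitsSpecPost (g.Blk A) g.len (s_114736.reg .rdi).toNat (bitsArg s_114736) s_114736 s_114736r := w_post
    have hrdi : (s_114736.reg .rdi).toNat = g.f := by
      rw [w_rdi_114736]
      exact hfT
    rw [hrdi] at hpost
    have hun0 : ShadowUntouched v.mem s_114736.mem := by v_untouched
    have hsx : Mem.SameExcept [⟨g.R - 8, g.R⟩] v.mem s_114736.mem := by
      rw [w_mem_114736]
      apply Mem.SameExcept.writeLE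
      · u_omega
      · refine ⟨_, List.mem_cons_self, ?_, ?_⟩
        · simp only []
          u_omega
        · simp only []
          u_omega
    -- the push and the reader's footprint as one footprint over the cut point's memory
    have hall : Mem.SameExcept [⟨g.R - 360, g.R⟩, ⟨g.f + 48, g.f + 56⟩, ⟨g.f + 84, g.f + 96⟩, ⟨g.f + 136, g.f + 144⟩,
        ⟨g.f + 1484, g.f + 1749⟩, ⟨g.f + 1752, g.f + 1784⟩] v.mem s_114736r.mem := by
      refine Mem.SameExcept.trans (ν := s_114736.mem) ?_ ?_
      · apply hsx.mono
        intro w hw a h1 h2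
        rw [List.mem_singleton.mp hw] at h1 h2
        simp only [] at h1 h2
        exact ⟨_, List.mem_cons_self, by simp only []; omega, by simp only []; omega⟩
      · apply w_same.mono
        intro w hw a h1 h2
        simp only [List.mem_cons, List.mem_nil_iff, or_false] at hw
        rcases hw with rfl | rfl | rfl | rfl | rfl | rfl
        · simp only [] at h1 h2
          exact ⟨_, List.mem_cons_self, by simp only []; omega, by simp only []; omega⟩
        · exact ⟨_, List.mem_cons_of_mem _ List.mem_cons_self, h1, h2⟩
        · exact ⟨_, List.mem_cons_of_mem _ (List.mem_cons_of_mem _ List.mem_cons_self), h1, h2⟩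
        · exact ⟨_, List.mem_cons_of_mem _ (List.mem_cons_of_mem _ (List.mem_cons_of_mem _ List.mem_cons_self)), h1, h2⟩
        · exact ⟨_, List.mem_cons_of_mem _ (List.mem_cons_of_mem _ (List.mem_cons_of_mem _ (List.mem_cons_of_mem _
            List.mem_cons_self))), h1, h2⟩
        · exact ⟨_, List.mem_cons_of_mem _ (List.mem_cons_of_mem _ (List.mem_cons_of_mem _ (List.mem_cons_of_mem _
            (List.mem_cons_of_mem _ List.mem_cons_self)))), h1, h2⟩
    have hunAll : ShadowUntouched v.mem s_114736r.mem := Mem.EqOn.trans hun0 hpost.untouched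
    have hq : ∀ w, w ∈ [(⟨g.R - 360, g.R⟩ : Span), ⟨g.f + 48, g.f + 56⟩, ⟨g.f + 84, g.f + 96⟩, ⟨g.f + 136, g.f + 144⟩,
        ⟨g.f + 1484, g.f + 1749⟩, ⟨g.f + 1752, g.f + 1784⟩] → OkWin0 g c w := by
      intro w hw
      simp only [List.mem_cons, List.mem_nil_iff, or_false] at hw
      unfold OkWin0
      rcases hw with rfl | rfl | rfl | rfl | rfl | rfl
      · left
        simp only []
        omega
      · right; right; right; right; left
        simp only []
        omega
      · right; right; right; right; right; left
        simp only []
        omega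
      · right; right; right; right; right; right; left
        simp only []
        omega
      · right; right; right; right; right; right; right; left
        simp only []
        omega
      · right; right; right; right; right; right; right; right
        simp only []
        omega
    obtain ⟨hm2, hcb2⟩ := hm0.step hpos hc hall hunAll (fun w hw => (hq w hw).ok) hpost.bits.bits
    -- the struct `cb(i)` and the `sorted_values` block are untouched
    have hstruct : (Codebook.block c).Kept v.mem s_114736r.mem := by
      apply blk_kept0 (c := c + 2120) hpos hall
      · intro w hw
        have k := hq w hw
        have p7 := hpos.objOut
        have p6 := hpos.f_stack
        have p1 := hpos.r_eq
        have p2 := hpos.ra_lo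
        have p3 := hpos.ra_hi
        have p11 := hpos.ar_stack
        unfold OkWin0 at k ⊢
        simp only [List.mem_cons, List.mem_nil_iff, or_false] at hw
        rcases hw with rfl | rfl | rfl | rfl | rfl | rfl
        · left
          simp only []
          omega
        · right; right; right; right; left
          simp only []
          omega
        · right; right; right; right; right; left
          simp only []
          omega
        · right; right; right; right; right; right; left
          simp only []
          omega
        · right; right; right; right; right; right; right; left
          simp only []
          omega
        · right; right; right; right; right; right; right; right
          simp only []
          omega
      · simp only [vblock, voff]
        omega
      · simp only [vblock, voff]
        omega
    have hsv : 1 ≤ Codebook.sorted_entries v.mem c → (Codebook.svBlock v.mem c).Kept v.mem s_114736r.mem := by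
      intro hse
      have hk4 := h.k.k4
      rw [hc] at hk4
      exact young_kept0 hm0 hpos hall (by rw [hc]; exact hq) (hk4.sv hse)
    apply ReachVia.done
    refine ⟨A, A2, A3, Ai, ?_⟩
    have hk := h.k
    have hfresh := h.fresh
    rw [hc] at hk hfresh
    have e_lt : Codebook.lookup_type s_114736r.mem c = Codebook.lookup_type v.mem c := by
      simp only [vacc, voff]
      exact hstruct.u8 _ (by simp only [vblock, voff]; omega) (by simp only [vblock, voff]; omega)
    have e_lv : Codebook.lookup_values s_114736r.mem c = Codebook.lookup_values v.mem c := by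
      simp only [vacc, voff]
      exact hstruct.u32 _ (by simp only [vblock, voff]; omega) (by simp only [vblock, voff]; omega)
    have e_mu : Codebook.multiplicands s_114736r.mem c = Codebook.multiplicands v.mem c := by
      simp only [vacc, voff]
      exact hstruct.u64 _ (by simp only [vblock, voff]; omega) (by simp only [vblock, voff]; omega)
    refine
      { frame := hm2.frame hfr w_rip (by rw [w_rsp, ← k_rsp]; exact hfr.rsp) (Vorbis.conv_code_eqOn w_code) w_inv hfr.offText
          hfr.ext
        cur := hm2.cur hhand (by rw [hcb2, w_kept.get .r14 rfl]; exact c_r14)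
        k := by rw [hcb2]; exact hk.frame hstruct hsv
        noTemps := h.noTemps
        fresh := ?_
        rax := ?_ }
    · rw [hcb2]
      exact ⟨by rw [e_lt]; exact hfresh.lookup_type, by rw [e_lv]; exact hfresh.lookup_values,
        by rw [e_mu]; exact hfresh.multiplicands⟩
    · have hres := hpost.bits.result.2
      have e4 : bitsArg s_114736 = 4 := by
        rw [Vorbis.Spec.bitsArg_def, w_rsi_114736]
        decide
      rw [e4] at hres
      exact hres (by omega)

end Vorbis.Spec.start_decoder_C9b

theorem Vorbis.Spec.Worked.start_decoder_C9b_ok : Vorbis.Spec.start_decoder_C9b.Statement := Vorbis.Spec.start_decoder_C9b.c9b_walk
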